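-- pv_equiv track=rewrite | github.com/MafuyuMinamo/pypjtgene | pypjtgene/pypjtgene.py | _check_invalid_character
-- ===== SOURCE A (Python) =====
-- def _check_invalid_character(file_name: str) -> bool:
--     """ファイル名に無効文字が使用されているかを判定
--
--     Args:
--         string (str): 任意の文字列
--
--     Returns:
--         bool: 無効文字が含まれている場合は True
--     """
--     invalid_character = [
--         "\\",
--         "/",
--         ":",
--         "*",
--         "?",
--         "<",
--         ">",
--         "|",
--         "+",
--     ]
--     for character in invalid_character:
--         if character in file_name:
--             return True
--         else:
--             pass
--     return False
-- ===== SOURCE B (Python) =====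
-- def _check_invalid_character(file_name: str) -> bool:
--     invalid = {"\\", "/", ":", "*", "?", "<", ">", "|", "+"}
--     return not invalid.isdisjoint(file_name)
-- ===== Notes on version B (the rewrite author's own statement) =====
-- stated objective: idiomatic
-- what changed: B scans the filename once, testing it against a set of invalid characters via set disjointness, instead of A's one substring scan of the filename per invalid character.
import Mathlib
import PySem

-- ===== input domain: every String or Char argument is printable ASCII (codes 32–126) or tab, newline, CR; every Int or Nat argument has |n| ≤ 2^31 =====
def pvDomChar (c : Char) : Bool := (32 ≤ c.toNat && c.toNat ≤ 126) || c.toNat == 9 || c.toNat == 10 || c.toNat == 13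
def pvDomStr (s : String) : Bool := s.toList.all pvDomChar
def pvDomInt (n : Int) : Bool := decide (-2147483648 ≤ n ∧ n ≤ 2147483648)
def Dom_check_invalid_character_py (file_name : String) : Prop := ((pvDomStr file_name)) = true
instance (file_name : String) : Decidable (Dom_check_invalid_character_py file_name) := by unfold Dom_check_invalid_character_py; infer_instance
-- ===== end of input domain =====

-- ===== PORT A =====
-- B tests the filename against a set of invalid characters at once (set disjointness) instead of one substring scan per invalid character; same return value.
def pvInvalidList : List String := ["\\", "/", ":", "*", "?", "<", ">", "|", "+"]

def pvALoop (file_name : String) : List String → Bool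
  | [] => false
  | c :: rest => if PySem.Str.isIn c file_name then true else pvALoop file_name rest

def check_invalid_character_py (file_name : String) : Bool := pvALoop file_name pvInvalidList

-- ===== PORT B =====
def pvInvalidSet : PySem.Set Char := PySem.Set.ofList ['\\', '/', ':', '*', '?', '<', '>', '|', '+']

def check_invalid_character_py_alt (file_name : String) : Bool :=
  !(PySem.Set.isdisjoint pvInvalidSet (PySem.Set.ofList file_name.toList))

-- ===== PRECONDITION & SPEC =====
def Spec_check_invalid_character_py (file_name : String) (out : Bool) : Prop := out = check_invalid_character_py_alt file_name
instance (file_name : String) (out : Bool) : Decidable (Spec_check_invalid_character_py file_name out) := by unfold Spec_check_invalid_character_py; infer_instance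

-- ===== CLAIM (what is proved, stated in full; the proofs are below) =====
def Claim_equal_check_invalid_character_py : Prop := ∀ (file_name : String), Dom_check_invalid_character_py file_name → Spec_check_invalid_character_py file_name (check_invalid_character_py file_name)

-- ===== LEMMAS AND PROOFS =====

-- ===== VERDICT (by name: the statement is the Claim_ definition above) =====
theorem check_invalid_character_py_spec : Claim_equal_check_invalid_character_py := by
  intro fn _
  unfold Spec_check_invalid_character_py
  have hset : pvInvalidSet = ['\\', '/', ':', '*', '?', '<', '>', '|', '+'] := by decide
  rw [Bool.eq_iff_iff]
  have ha : check_invalid_character_py fn = true ↔ ('\\' ∈ fn.toList ∨ '/' ∈ fn.toList ∨ ':' ∈ fn.toList ∨ '*' ∈ fn.toList ∨ '?' ∈ fn.toList ∨ '<' ∈ fn.toList ∨ '>' ∈ fn.toList ∨ '|' ∈ fn.toList ∨ '+' ∈ fn.toList) := by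
    simp [check_invalid_character_py, pvALoop, pvInvalidList, PySem.Chars.isIn_iff_infix, List.singleton_infix_iff]
  have hb : check_invalid_character_py_alt fn = true ↔ ('\\' ∈ fn.toList ∨ '/' ∈ fn.toList ∨ ':' ∈ fn.toList ∨ '*' ∈ fn.toList ∨ '?' ∈ fn.toList ∨ '<' ∈ fn.toList ∨ '>' ∈ fn.toList ∨ '|' ∈ fn.toList ∨ '+' ∈ fn.toList) := by
    simp [check_invalid_character_py_alt, PySem.Set.isdisjoint, hset, PySem.Set.contains, PySem.Set.mem_ofList]
  rw [ha, hb]
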